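-- pv_equiv track=rewrite | github.com/ramchandra3101/Leetcode_Everyday | partyPeople.py | partyPeople
-- ===== SOURCE A (Python) =====
-- def partyPeople(q, people, status):
--     currentCount, maxCount = 0, 0
--     for i in range(q):
--         if status[i] == '+':
--             currentCount += 1
--         else:
--             currentCount -= 1
--         maxCount = max(maxCount, currentCount)
--     return maxCount
-- ===== SOURCE B (Python) =====
-- def partyPeople(q, people, status):
--     # Divide and conquer: each segment yields (total, best) where total is the
--     # sum of its +/-1 deltas and best is the maximum prefix sum (empty prefix
--     # included, so best >= 0); segments combine as (sL+sR, max(bL, sL+bR)).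
--     def solve(seg):
--         if len(seg) == 0:
--             return (0, 0)
--         if len(seg) == 1:
--             d = 1 if seg[0] == '+' else -1
--             return (d, max(0, d))
--         mid = len(seg) // 2
--         sL, bL = solve(seg[:mid])
--         sR, bR = solve(seg[mid:])
--         return (sL + sR, max(bL, sL + bR))
--     return solve(status[:max(q, 0)])[1]
-- ===== Notes on version B (the rewrite author's own statement) =====
-- stated objective: alternative
-- what changed: Replaces A's left-to-right fused update-and-track-max loop with a divide-and-conquer recursion: each half-segment returns (delta total, best prefix sum) and halves combine as (sL+sR, max(bL, sL+bR)).
import Mathlib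
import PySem

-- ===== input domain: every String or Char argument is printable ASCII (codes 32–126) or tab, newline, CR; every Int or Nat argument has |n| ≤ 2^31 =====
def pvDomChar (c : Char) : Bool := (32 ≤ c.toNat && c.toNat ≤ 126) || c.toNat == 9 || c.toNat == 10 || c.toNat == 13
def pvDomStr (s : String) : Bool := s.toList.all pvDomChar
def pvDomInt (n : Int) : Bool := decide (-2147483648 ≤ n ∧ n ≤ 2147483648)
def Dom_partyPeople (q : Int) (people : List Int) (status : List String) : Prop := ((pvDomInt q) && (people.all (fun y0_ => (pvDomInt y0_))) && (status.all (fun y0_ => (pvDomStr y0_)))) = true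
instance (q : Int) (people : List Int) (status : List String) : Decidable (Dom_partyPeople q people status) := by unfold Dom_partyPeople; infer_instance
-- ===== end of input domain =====

-- B computes the answer by divide-and-conquer (each half-segment returns (delta total, best prefix sum), combined as (sL+sR, max(bL, sL+bR))) instead of A's left-to-right fused update-and-track-max loop; alternative algorithm, not faster.


-- ===== PORT A =====
-- for i in range(q): fused update of currentCount and maxCount; status[i] via pyGetD
-- (the default is never read under Pre_, which puts every i of range(q) in range of status).
def partyPeople (q : Int) (people : List Int) (status : List String) : Int :=
  ((PySem.List.pyRange 0 q 1).foldl
    (fun (st : Int × Int) (i : Int) =>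
      let currentCount := if PySem.List.pyGetD status i "" == "+" then st.1 + 1 else st.1 - 1
      (currentCount, max st.2 currentCount))
    (0, 0)).2

-- ===== PORT B =====
-- solve(seg): empty → (0,0); single → (d, max(0,d)); else split at len//2 and
-- combine (sL+sR, max(bL, sL+bR)).  Result = solve(status[:max(q,0)])[1].
def pvSolve : List String → Int × Int
  | [] => (0, 0)
  | [s] =>
      let d : Int := if s == "+" then 1 else -1
      (d, max 0 d)
  | a :: b :: rest =>
      let l := a :: b :: rest
      let mid := l.length / 2
      let L := pvSolve (l.take mid)
      let R := pvSolve (l.drop mid)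
      (L.1 + R.1, max L.2 (L.1 + R.2))
termination_by l => l.length
decreasing_by
  · simp [List.length_take]; omega
  · simp; omega

def partyPeople_alt (q : Int) (people : List Int) (status : List String) : Int :=
  (pvSolve (PySem.List.slice status (some 0) (some (max q 0)))).2

-- ===== PRECONDITION & SPEC =====
-- A indexes status[i] for every i in range(q): it raises IndexError exactly when q > len(status).
def Pre_partyPeople (q : Int) (people : List Int) (status : List String) : Prop :=
  q ≤ (status.length : Int)
instance (q : Int) (people : List Int) (status : List String) : Decidable (Pre_partyPeople q people status) := by unfold Pre_partyPeople; infer_instance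

def pvWitness_partyPeople : Int × List Int × List String := (3, [7], ["+", "+", "-"])

def Spec_partyPeople (q : Int) (people : List Int) (status : List String) (out : Int) : Prop := out = partyPeople_alt q people status
instance (q : Int) (people : List Int) (status : List String) (out : Int) : Decidable (Spec_partyPeople q people status out) := by unfold Spec_partyPeople; infer_instance

-- ===== CLAIM (what is proved, stated in full; the proofs are below) =====
def Claim_equal_partyPeople : Prop := ∀ (q : Int) (people : List Int) (status : List String), Dom_partyPeople q people status → Pre_partyPeople q people status → Spec_partyPeople q people status (partyPeople q people status)

-- ===== LEMMAS AND PROOFS =====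

def pvDelta (s : String) : Int := if s == "+" then 1 else -1

-- best prefix sum (empty prefix included) of a delta list
def pvBp : List Int → Int
  | [] => 0
  | d :: ds => max 0 (d + pvBp ds)

lemma pvBp_nonneg (l : List Int) : 0 ≤ pvBp l := by
  cases l with
  | nil => simp [pvBp]
  | cons d ds => simp [pvBp]

lemma pvBp_append (xs ys : List Int) :
    pvBp (xs ++ ys) = max (pvBp xs) (xs.sum + pvBp ys) := by
  induction xs with
  | nil => have := pvBp_nonneg ys; simp [pvBp]; omega
  | cons d ds ih => simp [pvBp, ih]; omega

lemma pvSolve_correct (l : List String) :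
    pvSolve l = ((l.map pvDelta).sum, pvBp (l.map pvDelta)) := by
  induction l using pvSolve.induct with
  | case1 => simp [pvSolve, pvBp]
  | case2 s => simp [pvSolve, pvBp, pvDelta]
  | case3 a b rest _l _mid ih1 ih2 =>
      rw [pvSolve, ih1, ih2]
      conv_rhs => rw [← List.take_append_drop ((a :: b :: rest).length / 2) (a :: b :: rest),
        List.map_append, List.sum_append, pvBp_append]

-- the prefix-sum sequence starting from running total t
def pvPrefixes (t : Int) : List Int → List Int
  | [] => []
  | d :: ds => (t + d) :: pvPrefixes (t + d) ds

lemma pvA_fold (l : List String) : ∀ (c m : Int),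
    (l.foldl
      (fun (st : Int × Int) (s : String) =>
        let currentCount := if s == "+" then st.1 + 1 else st.1 - 1
        (currentCount, max st.2 currentCount)) (c, m)).2
      = (pvPrefixes c (l.map pvDelta)).foldl max m := by
  induction l with
  | nil => intro c m; simp [pvPrefixes]
  | cons s l ih =>
    intro c m
    simp only [List.foldl, List.map, pvPrefixes, pvDelta]
    rw [ih]
    by_cases h : s == "+" <;> simp [h] <;> ring_nf

lemma pvFoldMax (l : List Int) : ∀ (t m : Int),
    (pvPrefixes t l).foldl max (max m t) = max m (t + pvBp l) := by
  induction l with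
  | nil => intro t m; simp [pvPrefixes, pvBp]
  | cons d ds ih =>
      intro t m
      simp only [pvPrefixes, List.foldl]
      rw [ih (t + d) (max m t)]
      simp [pvBp]; omega

theorem partyPeople_spec : Claim_equal_partyPeople := by
  intro q people status _ hpre
  unfold Spec_partyPeople
  have hq0 : (0 : Int) ≤ max q 0 := le_max_right _ _
  have htn : (max q 0).toNat = q.toNat := by omega
  have hlen : ((status.take q.toNat).length : Int) = q.toNat := by
    unfold Pre_partyPeople at hpre; simp [List.length_take]; omega
  have hB : partyPeople_alt q people status = pvBp ((status.take q.toNat).map pvDelta) := by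
    simp only [partyPeople_alt]
    rw [PySem.List.slice_zero_start, PySem.List.slice_to _ hq0, htn, pvSolve_correct]
  have hA : partyPeople q people status
      = (pvPrefixes 0 ((status.take q.toNat).map pvDelta)).foldl max 0 := by
    unfold partyPeople
    have h1 : PySem.List.pyRange 0 q 1 = PySem.List.pyRange 0 ((status.take q.toNat).length : Int) 1 := by
      rw [hlen, PySem.List.pyRange_one, PySem.List.pyRange_one]; congr 2; omega
    rw [h1]
    have hcong : (PySem.List.pyRange 0 ((status.take q.toNat).length : Int) 1).foldl
        (fun (st : Int × Int) (i : Int) =>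
          let currentCount := if PySem.List.pyGetD status i "" == "+" then st.1 + 1 else st.1 - 1
          (currentCount, max st.2 currentCount)) (0, 0)
        = (PySem.List.pyRange 0 ((status.take q.toNat).length : Int) 1).foldl
        (fun (st : Int × Int) (i : Int) =>
          let currentCount := if PySem.List.pyGetD (status.take q.toNat) i "" == "+" then st.1 + 1 else st.1 - 1
          (currentCount, max st.2 currentCount)) (0, 0) := by
      apply PySem.List.foldl_congr_mem
      intro st i hi
      have hmem := PySem.List.mem_pyRange_one.mp hi
      have h0 : 0 ≤ i := hmem.1
      have hlt : i < ((status.take q.toNat).length : Int) := hmem.2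
      have hget : PySem.List.pyGetD (status.take q.toNat) i "" = PySem.List.pyGetD status i "" := by
        rw [PySem.List.pyGetD_eq_getElem _ "" h0 hlt,
            PySem.List.pyGetD_eq_getElem status "" h0 (by simp [List.length_take] at hlt ⊢; omega)]
        simp [List.getElem_take]
      rw [hget]
    rw [hcong]
    have h2 : (PySem.List.pyRange 0 ((status.take q.toNat).length : Int) 1).foldl
        (fun (st : Int × Int) (i : Int) =>
          let currentCount := if PySem.List.pyGetD (status.take q.toNat) i "" == "+" then st.1 + 1 else st.1 - 1
          (currentCount, max st.2 currentCount)) (0, 0)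
        = (status.take q.toNat).foldl
        (fun (st : Int × Int) (s : String) =>
          let currentCount := if s == "+" then st.1 + 1 else st.1 - 1
          (currentCount, max st.2 currentCount)) (0, 0) :=
      PySem.List.foldl_pyRange_zero_pyGetD' (status.take q.toNat) ""
        (fun (st : Int × Int) (s : String) =>
          let currentCount := if s == "+" then st.1 + 1 else st.1 - 1
          (currentCount, max st.2 currentCount)) (0, 0)
    rw [h2, pvA_fold]
  rw [hA, hB]
  have hf := pvFoldMax ((status.take q.toNat).map pvDelta) 0 0
  have hn := pvBp_nonneg ((status.take q.toNat).map pvDelta)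
  simp only [max_self] at hf
  omega
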